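-- pv_equiv track=rewrite | github.com/woozch/AGDLDM | src/agdldm/utils/parquet.py | _get_parquet_index_mapping
-- ===== SOURCE A (Python) =====
-- from typing import List, Optional, Union, Callable, Tuple, Generator
--
-- def _get_parquet_index_mapping(row_counts: List[int]) -> List[tuple]:
--     """
--     Calculate the index range for each parquet file based on total row counts.
--
--     Args:
--         row_counts (List[int]): List of row counts for each parquet file
--
--     Returns:
--         List[tuple]: List of (start_index, end_index) tuples for each file
--     """
--     index_mapping = []
--     start_idx = 0
--     for count in row_counts:
--         end_idx = start_idx + count
--         index_mapping.append((start_idx, end_idx))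
--         start_idx = end_idx
--     return index_mapping
-- ===== SOURCE B (Python) =====
-- def _get_parquet_index_mapping(row_counts):
--     """Divide and conquer: ranges of each half computed independently,
--     right half shifted by the left half's total row count."""
--     if len(row_counts) <= 1:
--         return [(0, row_counts[0])] if row_counts else []
--     mid = len(row_counts) // 2
--     left = _get_parquet_index_mapping(row_counts[:mid])
--     offset = sum(row_counts[:mid])
--     right = _get_parquet_index_mapping(row_counts[mid:])
--     return left + [(start + offset, end + offset) for start, end in right]
-- ===== Notes on version B (the rewrite author's own statement) =====
-- stated objective: alternative
-- what changed: Replaces the single left-to-right running-accumulator loop with a divide-and-conquer recursion: split the list in half, compute each half's index ranges independently, and translate the right half's ranges by the left half's total row count.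
import Mathlib
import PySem

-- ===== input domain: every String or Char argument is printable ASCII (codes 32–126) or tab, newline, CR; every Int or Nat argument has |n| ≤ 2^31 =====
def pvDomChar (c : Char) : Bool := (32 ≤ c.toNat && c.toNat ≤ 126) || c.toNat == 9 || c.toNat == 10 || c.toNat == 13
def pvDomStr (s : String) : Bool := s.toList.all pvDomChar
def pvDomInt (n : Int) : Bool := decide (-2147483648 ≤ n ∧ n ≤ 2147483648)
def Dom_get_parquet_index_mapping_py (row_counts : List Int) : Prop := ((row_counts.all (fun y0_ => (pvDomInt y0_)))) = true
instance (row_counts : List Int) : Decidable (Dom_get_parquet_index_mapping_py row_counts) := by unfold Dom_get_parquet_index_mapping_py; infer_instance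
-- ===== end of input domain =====

-- B replaces A's single running-accumulator loop by a divide-and-conquer recursion (halve, solve
-- each half independently, translate the right half by the left half's total); alternative
-- decomposition, same results.

-- ===== PORT A =====
-- Literal port of A: one loop with an accumulator list and a running start index.
def get_parquet_index_mapping_py (row_counts : List Int) : List (Int × Int) :=
  (row_counts.foldl
    (fun (st : List (Int × Int) × Int) count =>
      let end_idx := st.2 + count
      (st.1 ++ [(st.2, end_idx)], end_idx))
    ([], 0)).1

-- ===== PORT B =====
-- Port of B: divide and conquer. Python's rc[:mid] / rc[mid:] with 0 ≤ mid ≤ len are exactly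
-- List.take mid / List.drop mid (PySem.List.slice_to_natCast / slice_from_natCast); len // 2 on a
-- nonnegative length is Nat division.
def get_parquet_index_mapping_py_alt (row_counts : List Int) : List (Int × Int) :=
  if _h : row_counts.length ≤ 1 then
    match row_counts with
    | [] => []
    | c :: _ => [(0, c)]
  else
    let mid := row_counts.length / 2
    let left := get_parquet_index_mapping_py_alt (row_counts.take mid)
    let offset := (row_counts.take mid).sum
    let right := get_parquet_index_mapping_py_alt (row_counts.drop mid)
    left ++ right.map (fun p => (p.1 + offset, p.2 + offset))
termination_by row_counts.length
decreasing_by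
  · simp only [List.length_take]; omega
  · simp only [List.length_drop]; omega

-- ===== PRECONDITION & SPEC =====
def Spec_get_parquet_index_mapping_py (row_counts : List Int) (out : List (Int × Int)) : Prop := out = get_parquet_index_mapping_py_alt row_counts
instance (row_counts : List Int) (out : List (Int × Int)) : Decidable (Spec_get_parquet_index_mapping_py row_counts out) := by unfold Spec_get_parquet_index_mapping_py; infer_instance

-- ===== CLAIM (what is proved, stated in full; the proofs are below) =====
def Claim_equal_get_parquet_index_mapping_py : Prop := ∀ (row_counts : List Int), Dom_get_parquet_index_mapping_py row_counts → Spec_get_parquet_index_mapping_py row_counts (get_parquet_index_mapping_py row_counts)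

-- ===== LEMMAS AND PROOFS =====

-- Reference function: head recursion producing the ranges of the tail shifted by the head count.
def pvRanges : List Int → List (Int × Int)
  | [] => []
  | c :: rest => (0, c) :: (pvRanges rest).map (fun p => (p.1 + c, p.2 + c))

theorem pv_fold_eq_ranges (rc : List Int) (acc : List (Int × Int)) (s : Int) :
    (rc.foldl
      (fun (st : List (Int × Int) × Int) count =>
        let end_idx := st.2 + count
        (st.1 ++ [(st.2, end_idx)], end_idx))
      (acc, s)).1
    = acc ++ (pvRanges rc).map (fun p => (p.1 + s, p.2 + s)) := by
  induction rc generalizing acc s with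
  | nil => simp [pvRanges]
  | cons c rest ih =>
      simp only [List.foldl, pvRanges]
      rw [ih]
      simp [List.map_map, Function.comp, add_comm, add_left_comm]

theorem pv_ranges_append (xs ys : List Int) :
    pvRanges (xs ++ ys)
      = pvRanges xs ++ (pvRanges ys).map (fun p => (p.1 + xs.sum, p.2 + xs.sum)) := by
  induction xs with
  | nil => simp [pvRanges]
  | cons c rest ih =>
      simp only [List.cons_append, pvRanges, ih, List.map_append, List.map_map, List.sum_cons]
      simp [Function.comp, add_comm, add_left_comm]

theorem pv_alt_eq_ranges (rc : List Int) :
    get_parquet_index_mapping_py_alt rc = pvRanges rc := by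
  by_cases h : rc.length ≤ 1
  · rw [get_parquet_index_mapping_py_alt]
    simp only [h, dite_true]
    match rc with
    | [] => rfl
    | [c] => simp [pvRanges]
    | _ :: _ :: _ => simp at h
  · rw [get_parquet_index_mapping_py_alt]
    simp only [h, dite_false]
    rw [pv_alt_eq_ranges (rc.take (rc.length / 2)),
        pv_alt_eq_ranges (rc.drop (rc.length / 2))]
    have := pv_ranges_append (rc.take (rc.length / 2)) (rc.drop (rc.length / 2))
    rw [List.take_append_drop] at this
    exact this.symm
termination_by rc.length
decreasing_by
  · simp only [List.length_take]; omega
  · simp only [List.length_drop]; omega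

-- ===== VERDICT (by name: the statement is the Claim_ definition above) =====
theorem get_parquet_index_mapping_py_spec : Claim_equal_get_parquet_index_mapping_py := by
  intro rc _
  unfold Spec_get_parquet_index_mapping_py get_parquet_index_mapping_py
  rw [pv_alt_eq_ranges]
  simpa using pv_fold_eq_ranges rc [] 0
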